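-- pv_equiv track=rewrite | github.com/HuygensING/republic-project | republic/fuzzy/fuzzy_string.py | score_ngram_overlap
-- ===== SOURCE A (Python) =====
-- from typing import List
--
-- def make_ngrams(text: str, n: int) -> List[str]:
--     """Turn a term string into a list of ngrams of size n
--
--     :param text: a text string
--     :type text: str
--     :param n: the ngram size
--     :type n: int
--     :return: a list of ngrams
--     :rtype: List[str]"""
--     text = "#{t}#".format(t=text)
--     max_start = len(text) - n + 1
--     return [text[start:start + n] for start in range(0, max_start)]
--
-- def score_ngram_overlap(term1: str, term2: str, ngram_size: int):
--     """Score the number of overlapping ngrams between two terms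
--
--     :param term1: a term string
--     :type term1: str
--     :param term2: a term string
--     :type term2: str
--     :param ngram_size: the character ngram size
--     :type ngram_size: int
--     :return: the number of overlapping ngrams
--     :rtype: int
--     """
--     term1_ngrams = make_ngrams(term1, ngram_size)
--     term2_ngrams = make_ngrams(term2, ngram_size)
--     overlap = 0
--     for ngram in term1_ngrams:
--         if ngram in term2_ngrams:
--             term2_ngrams.pop(term2_ngrams.index(ngram))
--             overlap += 1
--     return overlap
-- ===== SOURCE B (Python) =====
-- from typing import List
--
-- def make_ngrams(text: str, n: int) -> List[str]:
--     text = "#{t}#".format(t=text)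
--     max_start = len(text) - n + 1
--     return [text[start:start + n] for start in range(0, max_start)]
--
-- def score_ngram_overlap(term1: str, term2: str, ngram_size: int):
--     counts1 = {}
--     for g in make_ngrams(term1, ngram_size):
--         counts1[g] = counts1.get(g, 0) + 1
--     counts2 = {}
--     for g in make_ngrams(term2, ngram_size):
--         counts2[g] = counts2.get(g, 0) + 1
--     overlap = 0
--     for g, c in counts1.items():
--         overlap += min(c, counts2.get(g, 0))
--     return overlap
-- ===== Notes on version B (the rewrite author's own statement) =====
-- stated objective: faster
-- what changed: Replaces A's quadratic loop (membership test + index + pop on the second ngram list for every ngram of the first) by two count dictionaries built in one pass each, returning the sum of per-ngram minimum counts.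
import Mathlib
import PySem

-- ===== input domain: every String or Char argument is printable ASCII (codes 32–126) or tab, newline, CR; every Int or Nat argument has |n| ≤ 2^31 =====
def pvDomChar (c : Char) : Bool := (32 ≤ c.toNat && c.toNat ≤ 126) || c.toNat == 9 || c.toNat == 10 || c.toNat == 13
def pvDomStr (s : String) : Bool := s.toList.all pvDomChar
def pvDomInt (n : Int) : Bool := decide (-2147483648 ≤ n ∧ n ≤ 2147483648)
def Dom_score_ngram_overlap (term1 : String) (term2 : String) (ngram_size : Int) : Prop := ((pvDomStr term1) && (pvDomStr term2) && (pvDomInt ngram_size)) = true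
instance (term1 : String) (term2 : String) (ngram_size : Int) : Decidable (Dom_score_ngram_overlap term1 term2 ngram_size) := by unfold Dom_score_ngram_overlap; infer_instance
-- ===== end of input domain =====

-- B replaces A's quadratic pop-based scan by two one-pass count dictionaries and a sum of minima (faster).

-- ===== PORT A =====
-- shared helper: Python make_ngrams (identical in A and B), on the code-point list
def pvMakeNgrams (text : List Char) (n : Int) : List (List Char) :=
  let text := ('#' :: text) ++ ['#']
  let max_start := (text.length : Int) - n + 1
  (PySem.List.pyRange 0 max_start 1).map (fun start => PySem.List.slice text (some start) (some (start + n)))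

def score_ngram_overlap (term1 : String) (term2 : String) (ngram_size : Int) : Int :=
  let term1_ngrams := pvMakeNgrams term1.toList ngram_size
  let term2_ngrams := pvMakeNgrams term2.toList ngram_size
  let st := term1_ngrams.foldl (fun (st : List (List Char) × Int) ngram =>
    if ngram ∈ st.1 then
      match PySem.List.index? st.1 ngram with
      | some i =>
        match PySem.List.pop? st.1 (i : Int) with
        | some r => (r.2, st.2 + 1)
        | none => (st.1, st.2 + 1)    -- unreachable: index is in range
      | none => (st.1, st.2 + 1)      -- unreachable: ngram ∈ st.1
    else st) (term2_ngrams, 0)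
  st.2

-- ===== PORT B =====
def score_ngram_overlap_alt (term1 : String) (term2 : String) (ngram_size : Int) : Int :=
  let counts1 := (pvMakeNgrams term1.toList ngram_size).foldl
    (fun (d : PySem.Dict (List Char) Int) g => d.insert g (d.getD g 0 + 1)) PySem.Dict.empty
  let counts2 := (pvMakeNgrams term2.toList ngram_size).foldl
    (fun (d : PySem.Dict (List Char) Int) g => d.insert g (d.getD g 0 + 1)) PySem.Dict.empty
  counts1.items.foldl (fun acc p => acc + min p.2 (counts2.getD p.1 0)) 0

-- ===== PRECONDITION & SPEC =====
def Spec_score_ngram_overlap (term1 : String) (term2 : String) (ngram_size : Int) (out : Int) : Prop := out = score_ngram_overlap_alt term1 term2 ngram_size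
instance (term1 : String) (term2 : String) (ngram_size : Int) (out : Int) : Decidable (Spec_score_ngram_overlap term1 term2 ngram_size out) := by unfold Spec_score_ngram_overlap; infer_instance

-- ===== CLAIM (what is proved, stated in full; the proofs are below) =====
def Claim_equal_score_ngram_overlap : Prop := ∀ (term1 : String) (term2 : String) (ngram_size : Int), Dom_score_ngram_overlap term1 term2 ngram_size → Spec_score_ngram_overlap term1 term2 ngram_size (score_ngram_overlap term1 term2 ngram_size)

-- ===== LEMMAS AND PROOFS =====

-- List.erase does not depend on which lawful BEq instance is used
theorem pv_erase_irrel (g : List Char) (m : List (List Char)) :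
    @List.erase _ instBEqOfDecidableEq m g = @List.erase _ List.instBEq m g := by
  induction m with
  | nil => rfl
  | cons x xs ihm => simp [List.erase_cons, ihm]

-- A's loop adds the multiset-intersection cardinality to the running overlap
theorem pv_loopA (t1 : List (List Char)) : ∀ (t2 : List (List Char)) (k : Int),
    (t1.foldl (fun (st : List (List Char) × Int) ngram =>
      if ngram ∈ st.1 then
        match PySem.List.index? st.1 ngram with
        | some i =>
          match PySem.List.pop? st.1 (i : Int) with
          | some r => (r.2, st.2 + 1)
          | none => (st.1, st.2 + 1)
        | none => (st.1, st.2 + 1)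
      else st) (t2, k)).2
    = k + (((t1 : Multiset (List Char)) ∩ (t2 : Multiset (List Char))).card : Int) := by
  induction t1 with
  | nil => intro t2 k; simp
  | cons g t1 ih =>
    intro t2 k
    rw [List.foldl_cons]
    by_cases h : g ∈ t2
    · have hs : (PySem.List.index? t2 g).isSome := (PySem.List.index?_isSome_iff _ _).2 h
      obtain ⟨i, hi⟩ := Option.isSome_iff_exists.1 hs
      obtain ⟨hk, -, -⟩ := PySem.List.getElem_of_index?_eq_some hi
      have hidx : t2.idxOf g = i := by
        rw [List.idxOf_eq_getD_idxOf?, ← PySem.List.index?_eq_idxOf?, hi]; rfl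
      simp only [if_pos h, hi, PySem.List.pop?_natCast (h := hk)]
      rw [ih]
      have hco : ((t2.eraseIdx i : List (List Char)) : Multiset (List Char))
          = ((t2 : Multiset (List Char)).erase g) := by
        rw [← hidx, List.eraseIdx_idxOf_eq_erase, Multiset.coe_erase]
        rw [pv_erase_irrel]
      rw [hco, ← Multiset.cons_coe, Multiset.cons_inter_of_pos _ (Multiset.mem_coe.2 h), Multiset.card_cons]
      push_cast
      ring
    · simp only [if_neg h]
      rw [ih]
      rw [← Multiset.cons_coe, Multiset.cons_inter_of_neg _ (by simpa using h)]

-- B computes the sum over dedup of the ngrams of term1 of min counts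
theorem pv_loopB (term1 term2 : String) (ngram_size : Int) :
    score_ngram_overlap_alt term1 term2 ngram_size
    = (((PySem.List.dedup (pvMakeNgrams term1.toList ngram_size)).map
        (fun g => ((min ((pvMakeNgrams term1.toList ngram_size).count g)
                        ((pvMakeNgrams term2.toList ngram_size).count g) : Nat) : Int))).sum) := by
  unfold score_ngram_overlap_alt
  simp only [PySem.Dict.foldl_insert_getD_add_one_eq_counter, PySem.Dict.items_counter,
    List.foldl_map, PySem.List.foldl_add, PySem.Dict.getD_counter]
  simp [Nat.cast_min]

-- intersection cardinality as a sum of minima over first-occurrence dedup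
theorem pv_card_inter (l1 l2 : List (List Char)) :
    (((l1 : Multiset (List Char)) ∩ (l2 : Multiset (List Char))).card : Int)
    = (((PySem.List.dedup l1).map
        (fun g => ((min (l1.count g) (l2.count g) : Nat) : Int))).sum) := by
  have key : ((l1 : Multiset (List Char)) ∩ (l2 : Multiset (List Char))).card
      = ((PySem.List.dedup l1).map (fun g => min (l1.count g) (l2.count g))).sum := by
    have hsub : ((l1 : Multiset (List Char)) ∩ (l2 : Multiset (List Char))).toFinset ⊆ l1.toFinset := by
      intro a ha
      simp only [Multiset.mem_toFinset] at ha
      simpa [List.mem_toFinset] using Multiset.mem_of_le Multiset.inter_le_left ha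
    have hm : l1.toFinset = (PySem.List.dedup l1).toFinset := by
      ext a; simp
    rw [← Multiset.toFinset_sum_count_eq,
        Finset.sum_subset hsub (fun a _ ha => Multiset.count_eq_zero.2 (by simpa using ha)),
        hm, List.sum_toFinset _ (PySem.List.nodup_dedup l1)]
    congr 1
    refine List.map_congr_left (fun a _ => ?_)
    simp only [Multiset.count_inter, Multiset.coe_count]
    have hc : ∀ (m : List (List Char)), @List.count _ instBEqOfDecidableEq a m = List.count a m := by
      intro m
      induction m with
      | nil => rfl
      | cons x xs ih => simp [List.count_cons, ih]
    rw [hc, hc]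
  rw [key]
  push_cast [List.map_map]
  simp [Function.comp_def, Nat.cast_min]

-- ===== VERDICT (by name: the statement is the Claim_ definition above) =====
theorem score_ngram_overlap_spec : Claim_equal_score_ngram_overlap := by
  intro term1 term2 ngram_size _
  unfold Spec_score_ngram_overlap score_ngram_overlap
  rw [pv_loopA, pv_card_inter, ← pv_loopB]
  simp
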